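-- pv_equiv track=rewrite | github.com/A-M-l-G-O/PracticePP2v2 | Practice_10/Paint_game/paint.py | hit_palette
-- ===== SOURCE A (Python) =====
-- PALETTE = [
--     (0,   0,   0),    # black
--     (255, 255, 255),  # white
--     (220, 50,  50),   # red
--     (50,  180, 50),   # green
--     (50,  50,  220),  # blue
--     (255, 220, 0),    # yellow
--     (255, 140, 0),    # orange
--     (180, 0,   220),  # purple
--     (0,   200, 200),  # cyan
--     (255, 105, 180),  # pink
--     (100, 60,  20),   # brown
--     (140, 140, 140),  # gray
-- ]
--
-- def hit_palette(mx, my):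
--     PAL_X = 10
--     for i, col in enumerate(PALETTE):
--         row = i // 6
--         ci  = i % 6
--         rx  = PAL_X + ci * 38
--         ry  = 8 + row * 34
--         if rx <= mx <= rx + 30 and ry <= my <= ry + 28:
--             return col
--     return None
-- ===== SOURCE B (Python) =====
-- PALETTE = [
--     (0,   0,   0),
--     (255, 255, 255),
--     (220, 50,  50),
--     (50,  180, 50),
--     (50,  50,  220),
--     (255, 220, 0),
--     (255, 140, 0),
--     (180, 0,   220),
--     (0,   200, 200),
--     (255, 105, 180),
--     (100, 60,  20),
--     (140, 140, 140),
-- ]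
--
-- def hit_palette(mx, my):
--     dx = mx - 10
--     dy = my - 8
--     if dx < 0 or dy < 0:
--         return None
--     ci, ox = divmod(dx, 38)
--     row, oy = divmod(dy, 34)
--     if ox <= 30 and oy <= 28 and ci <= 5 and row <= 1:
--         return PALETTE[row * 6 + ci]
--     return None
-- ===== Notes on version B (the rewrite author's own statement) =====
-- stated objective: simpler
-- what changed: Replaces the 12-cell linear scan with closed-form grid arithmetic: divmod by the cell pitch yields the column/row and the in-cell offset, and one bounds check indexes PALETTE directly.
import Mathlib
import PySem

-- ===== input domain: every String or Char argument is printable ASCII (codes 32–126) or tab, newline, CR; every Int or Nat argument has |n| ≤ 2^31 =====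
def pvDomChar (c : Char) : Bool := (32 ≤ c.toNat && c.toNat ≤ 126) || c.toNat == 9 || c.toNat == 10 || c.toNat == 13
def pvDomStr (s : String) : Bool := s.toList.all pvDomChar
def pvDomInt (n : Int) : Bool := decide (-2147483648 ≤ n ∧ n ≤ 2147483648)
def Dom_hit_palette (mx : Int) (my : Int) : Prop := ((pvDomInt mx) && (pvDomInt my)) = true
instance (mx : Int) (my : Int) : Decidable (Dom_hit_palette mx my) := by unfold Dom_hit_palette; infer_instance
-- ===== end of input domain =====

-- B replaces A's 12-cell linear scan with closed-form divmod grid arithmetic (objective: simpler).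


-- ===== PORT A =====
def PALETTE : List (Int × Int × Int) :=
  [(0, 0, 0), (255, 255, 255), (220, 50, 50), (50, 180, 50), (50, 50, 220),
   (255, 220, 0), (255, 140, 0), (180, 0, 220), (0, 200, 200), (255, 105, 180),
   (100, 60, 20), (140, 140, 140)]

-- the 'for i, col in enumerate(PALETTE)' loop with early return
def hitLoop (mx my : Int) : List (Int × Int × Int) → Int → Option (Int × Int × Int)
  | [], _ => none
  | col :: rest, i =>
    let row := PySem.Int.floordiv i 6
    let ci := PySem.Int.mod i 6
    let rx := 10 + ci * 38
    let ry := 8 + row * 34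
    if rx ≤ mx ∧ mx ≤ rx + 30 ∧ ry ≤ my ∧ my ≤ ry + 28 then some col
    else hitLoop mx my rest (i + 1)

def hit_palette (mx : Int) (my : Int) : Option (Int × Int × Int) :=
  hitLoop mx my PALETTE 0

-- ===== PORT B =====
def hit_palette_alt (mx : Int) (my : Int) : Option (Int × Int × Int) :=
  let dx := mx - 10
  let dy := my - 8
  if dx < 0 ∨ dy < 0 then none
  else
    let ci := PySem.Int.floordiv dx 38
    let ox := PySem.Int.mod dx 38
    let row := PySem.Int.floordiv dy 34
    let oy := PySem.Int.mod dy 34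
    if ox ≤ 30 ∧ oy ≤ 28 ∧ ci ≤ 5 ∧ row ≤ 1 then
      PySem.List.pyGet? PALETTE (row * 6 + ci) |>.getD (0, 0, 0)  -- index is always in range here
    else none

-- ===== PRECONDITION & SPEC =====
def Spec_hit_palette (mx : Int) (my : Int) (out : Option (Int × Int × Int)) : Prop := out = hit_palette_alt mx my
instance (mx : Int) (my : Int) (out : Option (Int × Int × Int)) : Decidable (Spec_hit_palette mx my out) := by unfold Spec_hit_palette; infer_instance

-- ===== CLAIM (what is proved, stated in full; the proofs are below) =====
def Claim_equal_hit_palette : Prop := ∀ (mx : Int) (my : Int), Dom_hit_palette mx my → Spec_hit_palette mx my (hit_palette mx my)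

-- ===== LEMMAS AND PROOFS =====
set_option maxHeartbeats 2000000 in
theorem hit_eq (mx my : Int) : hit_palette mx my = hit_palette_alt mx my := by
  have hd38 : ∀ a : Int, Int.fdiv a 38 = a / 38 :=
    fun a => Int.fdiv_eq_ediv_of_nonneg a (by norm_num)
  have hd34 : ∀ a : Int, Int.fdiv a 34 = a / 34 :=
    fun a => Int.fdiv_eq_ediv_of_nonneg a (by norm_num)
  have hd6 : ∀ a : Int, Int.fdiv a 6 = a / 6 :=
    fun a => Int.fdiv_eq_ediv_of_nonneg a (by norm_num)
  have hm38 : ∀ a : Int, Int.fmod a 38 = a % 38 :=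
    fun a => Int.fmod_eq_emod_of_nonneg a (by norm_num)
  have hm34 : ∀ a : Int, Int.fmod a 34 = a % 34 :=
    fun a => Int.fmod_eq_emod_of_nonneg a (by norm_num)
  have hm6 : ∀ a : Int, Int.fmod a 6 = a % 6 :=
    fun a => Int.fmod_eq_emod_of_nonneg a (by norm_num)
  simp only [hit_palette, PALETTE]
  simp only [hitLoop]
  simp only [hit_palette_alt, PALETTE]
  simp only [PySem.Int.floordiv, PySem.Int.mod]
  simp only [hd38, hd34, hd6, hm38, hm34, hm6]
  norm_num
  by_cases h0 : 10 ≤ mx ∧ mx ≤ 40 ∧ 8 ≤ my ∧ my ≤ 36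
  · rw [if_pos h0, show (my - 8) / 34 = (0 : Int) from by omega,
       show (mx - 10) / 38 = (0 : Int) from by omega,
       if_neg (show ¬(mx < 10 ∨ my < 8) from by omega),
       if_pos (show (mx - 10) % 38 ≤ 30 ∧ (my - 8) % 34 ≤ 28 ∧ (0 : Int) ≤ 5 ∧ (0 : Int) ≤ 1 from by omega)]
    rfl
  rw [if_neg h0]
  by_cases h1 : 48 ≤ mx ∧ mx ≤ 78 ∧ 8 ≤ my ∧ my ≤ 36
  · rw [if_pos h1, show (my - 8) / 34 = (0 : Int) from by omega,
       show (mx - 10) / 38 = (1 : Int) from by omega,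
       if_neg (show ¬(mx < 10 ∨ my < 8) from by omega),
       if_pos (show (mx - 10) % 38 ≤ 30 ∧ (my - 8) % 34 ≤ 28 ∧ (1 : Int) ≤ 5 ∧ (0 : Int) ≤ 1 from by omega)]
    rfl
  rw [if_neg h1]
  by_cases h2 : 86 ≤ mx ∧ mx ≤ 116 ∧ 8 ≤ my ∧ my ≤ 36
  · rw [if_pos h2, show (my - 8) / 34 = (0 : Int) from by omega,
       show (mx - 10) / 38 = (2 : Int) from by omega,
       if_neg (show ¬(mx < 10 ∨ my < 8) from by omega),
       if_pos (show (mx - 10) % 38 ≤ 30 ∧ (my - 8) % 34 ≤ 28 ∧ (2 : Int) ≤ 5 ∧ (0 : Int) ≤ 1 from by omega)]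
    rfl
  rw [if_neg h2]
  by_cases h3 : 124 ≤ mx ∧ mx ≤ 154 ∧ 8 ≤ my ∧ my ≤ 36
  · rw [if_pos h3, show (my - 8) / 34 = (0 : Int) from by omega,
       show (mx - 10) / 38 = (3 : Int) from by omega,
       if_neg (show ¬(mx < 10 ∨ my < 8) from by omega),
       if_pos (show (mx - 10) % 38 ≤ 30 ∧ (my - 8) % 34 ≤ 28 ∧ (3 : Int) ≤ 5 ∧ (0 : Int) ≤ 1 from by omega)]
    rfl
  rw [if_neg h3]
  by_cases h4 : 162 ≤ mx ∧ mx ≤ 192 ∧ 8 ≤ my ∧ my ≤ 36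
  · rw [if_pos h4, show (my - 8) / 34 = (0 : Int) from by omega,
       show (mx - 10) / 38 = (4 : Int) from by omega,
       if_neg (show ¬(mx < 10 ∨ my < 8) from by omega),
       if_pos (show (mx - 10) % 38 ≤ 30 ∧ (my - 8) % 34 ≤ 28 ∧ (4 : Int) ≤ 5 ∧ (0 : Int) ≤ 1 from by omega)]
    rfl
  rw [if_neg h4]
  by_cases h5 : 200 ≤ mx ∧ mx ≤ 230 ∧ 8 ≤ my ∧ my ≤ 36
  · rw [if_pos h5, show (my - 8) / 34 = (0 : Int) from by omega,
       show (mx - 10) / 38 = (5 : Int) from by omega,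
       if_neg (show ¬(mx < 10 ∨ my < 8) from by omega),
       if_pos (show (mx - 10) % 38 ≤ 30 ∧ (my - 8) % 34 ≤ 28 ∧ (5 : Int) ≤ 5 ∧ (0 : Int) ≤ 1 from by omega)]
    rfl
  rw [if_neg h5]
  by_cases h6 : 10 ≤ mx ∧ mx ≤ 40 ∧ 42 ≤ my ∧ my ≤ 70
  · rw [if_pos h6, show (my - 8) / 34 = (1 : Int) from by omega,
       show (mx - 10) / 38 = (0 : Int) from by omega,
       if_neg (show ¬(mx < 10 ∨ my < 8) from by omega),
       if_pos (show (mx - 10) % 38 ≤ 30 ∧ (my - 8) % 34 ≤ 28 ∧ (0 : Int) ≤ 5 ∧ (1 : Int) ≤ 1 from by omega)]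
    rfl
  rw [if_neg h6]
  by_cases h7 : 48 ≤ mx ∧ mx ≤ 78 ∧ 42 ≤ my ∧ my ≤ 70
  · rw [if_pos h7, show (my - 8) / 34 = (1 : Int) from by omega,
       show (mx - 10) / 38 = (1 : Int) from by omega,
       if_neg (show ¬(mx < 10 ∨ my < 8) from by omega),
       if_pos (show (mx - 10) % 38 ≤ 30 ∧ (my - 8) % 34 ≤ 28 ∧ (1 : Int) ≤ 5 ∧ (1 : Int) ≤ 1 from by omega)]
    rfl
  rw [if_neg h7]
  by_cases h8 : 86 ≤ mx ∧ mx ≤ 116 ∧ 42 ≤ my ∧ my ≤ 70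
  · rw [if_pos h8, show (my - 8) / 34 = (1 : Int) from by omega,
       show (mx - 10) / 38 = (2 : Int) from by omega,
       if_neg (show ¬(mx < 10 ∨ my < 8) from by omega),
       if_pos (show (mx - 10) % 38 ≤ 30 ∧ (my - 8) % 34 ≤ 28 ∧ (2 : Int) ≤ 5 ∧ (1 : Int) ≤ 1 from by omega)]
    rfl
  rw [if_neg h8]
  by_cases h9 : 124 ≤ mx ∧ mx ≤ 154 ∧ 42 ≤ my ∧ my ≤ 70
  · rw [if_pos h9, show (my - 8) / 34 = (1 : Int) from by omega,
       show (mx - 10) / 38 = (3 : Int) from by omega,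
       if_neg (show ¬(mx < 10 ∨ my < 8) from by omega),
       if_pos (show (mx - 10) % 38 ≤ 30 ∧ (my - 8) % 34 ≤ 28 ∧ (3 : Int) ≤ 5 ∧ (1 : Int) ≤ 1 from by omega)]
    rfl
  rw [if_neg h9]
  by_cases h10 : 162 ≤ mx ∧ mx ≤ 192 ∧ 42 ≤ my ∧ my ≤ 70
  · rw [if_pos h10, show (my - 8) / 34 = (1 : Int) from by omega,
       show (mx - 10) / 38 = (4 : Int) from by omega,
       if_neg (show ¬(mx < 10 ∨ my < 8) from by omega),
       if_pos (show (mx - 10) % 38 ≤ 30 ∧ (my - 8) % 34 ≤ 28 ∧ (4 : Int) ≤ 5 ∧ (1 : Int) ≤ 1 from by omega)]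
    rfl
  rw [if_neg h10]
  by_cases h11 : 200 ≤ mx ∧ mx ≤ 230 ∧ 42 ≤ my ∧ my ≤ 70
  · rw [if_pos h11, show (my - 8) / 34 = (1 : Int) from by omega,
       show (mx - 10) / 38 = (5 : Int) from by omega,
       if_neg (show ¬(mx < 10 ∨ my < 8) from by omega),
       if_pos (show (mx - 10) % 38 ≤ 30 ∧ (my - 8) % 34 ≤ 28 ∧ (5 : Int) ≤ 5 ∧ (1 : Int) ≤ 1 from by omega)]
    rfl
  rw [if_neg h11]
  by_cases hg : mx < 10 ∨ my < 8
  · rw [if_pos hg]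
  · rw [if_neg hg,
       if_neg (show ¬((mx - 10) % 38 ≤ 30 ∧ (my - 8) % 34 ≤ 28 ∧ (mx - 10) / 38 ≤ 5 ∧ (my - 8) / 34 ≤ 1) from by omega)]

-- ===== VERDICT (by name: the statement is the Claim_ definition above) =====
theorem hit_palette_spec : Claim_equal_hit_palette := by
  intro mx my _
  unfold Spec_hit_palette
  exact hit_eq mx my
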